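-- pv_equiv track=rewrite | github.com/planetlab/sfa | sfa/client/client_helper.py | sfa_to_pg_users_arg
-- ===== SOURCE A (Python) =====
-- def sfa_to_pg_users_arg(users):
--
--     new_users = []
--     fields = ['urn', 'keys']
--     for user in users:
--         new_user = dict([item for item in user.items() \
--           if item[0] in fields])
--         new_users.append(new_user)
--     return new_users
-- ===== SOURCE B (Python) =====
-- def sfa_to_pg_users_arg(users):
--     keep = ('urn', 'keys')
--     new_users = []
--     for user in users:
--         nu = dict(user)
--         for k in list(nu):
--             if k not in keep:
--                 del nu[k]
--         new_users.append(nu)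
--     return new_users
-- ===== Notes on version B (the rewrite author's own statement) =====
-- stated objective: alternative
-- what changed: Instead of filtering each user's items by membership and building a fresh dict, B copies the whole user dict and deletes the unwanted keys in place (copy-and-prune instead of filter-and-rebuild).
import Mathlib
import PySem

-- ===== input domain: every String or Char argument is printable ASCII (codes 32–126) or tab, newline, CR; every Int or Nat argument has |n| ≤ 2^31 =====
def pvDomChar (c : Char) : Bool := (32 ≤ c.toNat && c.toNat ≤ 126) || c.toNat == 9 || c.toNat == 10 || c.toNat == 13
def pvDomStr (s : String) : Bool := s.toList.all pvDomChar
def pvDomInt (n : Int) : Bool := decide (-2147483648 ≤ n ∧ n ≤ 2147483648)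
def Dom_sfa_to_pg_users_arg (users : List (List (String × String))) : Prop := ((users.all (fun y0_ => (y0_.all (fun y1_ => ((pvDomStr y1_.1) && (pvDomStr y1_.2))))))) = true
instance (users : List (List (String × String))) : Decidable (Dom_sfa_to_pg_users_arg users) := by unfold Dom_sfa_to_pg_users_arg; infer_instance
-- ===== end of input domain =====

-- B replaces A's filter-items-and-rebuild with copy-the-dict-and-delete-unwanted-keys (alternative decomposition, same cost).


-- ===== PORT A =====
def sfa_to_pg_users_arg (users : List (List (String × String))) : List (List (String × String)) :=
  let fields : List String := ["urn", "keys"]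
  users.foldl (fun new_users user =>
    new_users ++ [(PySem.Dict.ofList (user.filter (fun item => fields.contains item.1))).items]) []

-- ===== PORT B =====
def sfa_to_pg_users_arg_alt (users : List (List (String × String))) : List (List (String × String)) :=
  users.foldl (fun new_users user =>
    let nu := PySem.Dict.ofList user
    new_users ++
      [((nu.keys).foldl (fun d k => if !(k == "urn" || k == "keys") then d.erase k else d) nu).items]) []

-- ===== PRECONDITION & SPEC =====
-- Pre_ excludes association lists in which some user has a duplicate key: a Python dict cannot
-- contain duplicate keys, so such lists do not represent any input the Python function accepts.
def Pre_sfa_to_pg_users_arg (users : List (List (String × String))) : Prop :=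
  ∀ user ∈ users, (user.map Prod.fst).Nodup
instance (users : List (List (String × String))) : Decidable (Pre_sfa_to_pg_users_arg users) := by
  unfold Pre_sfa_to_pg_users_arg; infer_instance
def pvWitness_sfa_to_pg_users_arg : (List (List (String × String))) :=
  [[("urn", "urn:pub:alice"), ("email", "a@b.c")], [("keys", "ssh-rsa AAA")]]
def Spec_sfa_to_pg_users_arg (users : List (List (String × String))) (out : List (List (String × String))) : Prop := out = sfa_to_pg_users_arg_alt users
instance (users : List (List (String × String))) (out : List (List (String × String))) : Decidable (Spec_sfa_to_pg_users_arg users out) := by unfold Spec_sfa_to_pg_users_arg; infer_instance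

-- ===== CLAIM (what is proved, stated in full; the proofs are below) =====
def Claim_equal_sfa_to_pg_users_arg : Prop := ∀ (users : List (List (String × String))), Dom_sfa_to_pg_users_arg users → Pre_sfa_to_pg_users_arg users → Spec_sfa_to_pg_users_arg users (sfa_to_pg_users_arg users)

-- ===== LEMMAS AND PROOFS =====

lemma ofList_items_of_nodup (l : List (String × String)) (h : (l.map Prod.fst).Nodup) :
    (PySem.Dict.ofList l).items = l := by
  have := PySem.Dict.items_foldl_insert_fresh (l := l) (k := Prod.fst) (v := Prod.snd)
    (d := PySem.Dict.empty) (by intro a _; simp [pysem]) h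
  simpa [PySem.Dict.ofList, PySem.Dict.update] using this

-- items of B's key-pruning fold: a filter keeping pairs whose key passes p or is absent from ks
lemma prune_items (p : String → Bool) :
    ∀ (ks : List String) (d : PySem.Dict String String),
      (ks.foldl (fun d k => if !(p k) then d.erase k else d) d).items
        = d.items.filter (fun q => p q.1 || !(ks.contains q.1)) := by
  intro ks
  induction ks with
  | nil => intro d; simp
  | cons k ks ih =>
    intro d
    by_cases hp : p k = true
    · have hstep : (if (!p k) = true then d.erase k else d) = d := by simp [hp]
      rw [List.foldl_cons, hstep, ih]
      refine List.filter_congr ?_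
      intro q _
      by_cases hqk : q.1 = k
      · simp [hqk, hp]
      · simp [hqk]
    · have hp' : p k = false := by simpa using hp
      have hstep : (if (!p k) = true then d.erase k else d) = d.erase k := by simp [hp']
      rw [List.foldl_cons, hstep, ih]
      simp only [PySem.Dict.erase, List.filter_filter]
      refine List.filter_congr ?_
      intro q _
      by_cases hqk : q.1 = k
      · simp [hqk, hp']
      · simp [hqk]

lemma per_user (user : List (String × String)) (h : (user.map Prod.fst).Nodup) :
    (PySem.Dict.ofList (user.filter (fun item => (["urn", "keys"] : List String).contains item.1))).items
      = (((PySem.Dict.ofList user).keys).foldl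
          (fun d k => if !(k == "urn" || k == "keys") then d.erase k else d)
          (PySem.Dict.ofList user)).items := by
  have hfn : ((user.filter (fun item => (["urn", "keys"] : List String).contains item.1)).map Prod.fst).Nodup :=
    h.sublist (List.Sublist.map Prod.fst List.filter_sublist)
  rw [ofList_items_of_nodup _ hfn,
      prune_items (fun k => k == "urn" || k == "keys") _ (PySem.Dict.ofList user),
      ofList_items_of_nodup user h]
  have hkeys : (PySem.Dict.ofList user).keys = user.map Prod.fst := by
    simp [PySem.Dict.keys, ofList_items_of_nodup user h]
  rw [hkeys]
  refine List.filter_congr ?_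
  intro q hq
  have hmem : q.1 ∈ user.map Prod.fst := List.mem_map_of_mem hq
  by_cases h1 : q.1 = "keys" <;> by_cases h2 : q.1 = "urn" <;> simp [h1, h2, hmem, Bool.or_comm]

-- ===== VERDICT (by name: the statement is the Claim_ definition above) =====
theorem sfa_to_pg_users_arg_spec : Claim_equal_sfa_to_pg_users_arg := by
  intro users _ hpre
  unfold Spec_sfa_to_pg_users_arg sfa_to_pg_users_arg sfa_to_pg_users_arg_alt
  simp only [PySem.List.foldl_append_singleton_eq_map]
  exact List.map_congr_left fun user hu => per_user user (hpre user hu)
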